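-- pv_equiv track=rewrite | github.com/pypi-data/pypi-mirror-396 | packages/sip-videogen/sip_videogen-0.2.7-py3-none-any.whl/sip_videogen/generators/video_generator.py | _infer_ambient_sounds
-- ===== SOURCE A (Python) =====
-- def _infer_ambient_sounds(setting: str) -> list[str]:
--     """Infer ambient sounds from scene setting description.
--
--     Args:
--         setting: The setting description to analyze.
--
--     Returns:
--         List of ambient sound descriptions.
--     """
--     setting_lower = setting.lower()
--     sounds = []
--
--     # Beach/ocean environments
--     if any(word in setting_lower for word in ["beach", "ocean", "sea", "coast", "shore"]):
--         sounds.extend(["waves crashing", "seagulls"])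
--
--     # Forest/nature environments
--     if any(word in setting_lower for word in ["forest", "woods", "jungle", "trees", "nature"]):
--         sounds.extend(["birds chirping", "rustling leaves", "wind through trees"])
--
--     # City/urban environments
--     city_keywords = ["city", "street", "urban", "downtown", "sidewalk"]
--     if any(word in setting_lower for word in city_keywords):
--         sounds.extend(["city traffic", "distant sirens", "urban ambience"])
--
--     # Indoor environments
--     indoor_keywords = ["office", "room", "indoor", "building", "house", "home"]
--     if any(word in setting_lower for word in indoor_keywords):
--         sounds.append("room tone")
--
--     # Sports/gym environments
--     sports_keywords = ["gym", "basketball", "court", "field", "stadium", "arena"]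
--     if any(word in setting_lower for word in sports_keywords):
--         sounds.extend(["sneakers squeaking", "crowd noise"])
--
--     # Restaurant/cafe environments
--     if any(word in setting_lower for word in ["restaurant", "cafe", "coffee", "diner", "bar"]):
--         sounds.extend(["clinking dishes", "ambient chatter"])
--
--     # Park/outdoor environments
--     if any(word in setting_lower for word in ["park", "garden", "lawn", "yard", "backyard"]):
--         sounds.extend(["birds", "wind"])
--
--     # Mountain/hiking environments
--     if any(word in setting_lower for word in ["mountain", "hill", "hike", "trail", "cliff"]):
--         sounds.extend(["wind", "distant birds"])
--
--     # Water environments (non-ocean)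
--     if any(word in setting_lower for word in ["river", "stream", "waterfall", "lake", "pond"]):
--         sounds.append("flowing water")
--
--     # Rain/weather
--     if any(word in setting_lower for word in ["rain", "storm", "thunder"]):
--         sounds.append("rain sounds")
--
--     # Night environments
--     if any(word in setting_lower for word in ["night", "evening", "dark"]):
--         sounds.append("crickets")
--
--     return sounds
-- ===== SOURCE B (Python) =====
-- RULES = [
--     (["beach", "ocean", "sea", "coast", "shore"], ["waves crashing", "seagulls"]),
--     (["forest", "woods", "jungle", "trees", "nature"], ["birds chirping", "rustling leaves", "wind through trees"]),
--     (["city", "street", "urban", "downtown", "sidewalk"], ["city traffic", "distant sirens", "urban ambience"]),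
--     (["office", "room", "indoor", "building", "house", "home"], ["room tone"]),
--     (["gym", "basketball", "court", "field", "stadium", "arena"], ["sneakers squeaking", "crowd noise"]),
--     (["restaurant", "cafe", "coffee", "diner", "bar"], ["clinking dishes", "ambient chatter"]),
--     (["park", "garden", "lawn", "yard", "backyard"], ["birds", "wind"]),
--     (["mountain", "hill", "hike", "trail", "cliff"], ["wind", "distant birds"]),
--     (["river", "stream", "waterfall", "lake", "pond"], ["flowing water"]),
--     (["rain", "storm", "thunder"], ["rain sounds"]),
--     (["night", "evening", "dark"], ["crickets"]),
-- ]
--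
-- _KEYWORD_GROUP = {kw: g for g, (kws, _) in enumerate(RULES) for kw in kws}
-- _LENGTHS = sorted({len(kw) for kw in _KEYWORD_GROUP})
--
--
-- def _infer_ambient_sounds(setting: str) -> list[str]:
--     # Single sliding-window pass over the text: at each position hash the
--     # candidate substrings (one per keyword length) into a keyword->group
--     # dict, collecting the set of matched groups; then emit tags group-wise.
--     s = setting.lower()
--     matched = set()
--     for i in range(len(s)):
--         for length in _LENGTHS:
--             g = _KEYWORD_GROUP.get(s[i:i + length])
--             if g is not None:
--                 matched.add(g)
--     return [t for g, (_, tags) in enumerate(RULES) if g in matched for t in tags]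
-- ===== Notes on version B (the rewrite author's own statement) =====
-- stated objective: alternative
-- what changed: Replaced A's eleven per-keyword substring scans by a single sliding-window pass over the lowered text that hashes each candidate substring (one per distinct keyword length) into a keyword-to-group dict, collecting a set of matched group indices and then emitting tags group-wise.
import Mathlib
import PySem

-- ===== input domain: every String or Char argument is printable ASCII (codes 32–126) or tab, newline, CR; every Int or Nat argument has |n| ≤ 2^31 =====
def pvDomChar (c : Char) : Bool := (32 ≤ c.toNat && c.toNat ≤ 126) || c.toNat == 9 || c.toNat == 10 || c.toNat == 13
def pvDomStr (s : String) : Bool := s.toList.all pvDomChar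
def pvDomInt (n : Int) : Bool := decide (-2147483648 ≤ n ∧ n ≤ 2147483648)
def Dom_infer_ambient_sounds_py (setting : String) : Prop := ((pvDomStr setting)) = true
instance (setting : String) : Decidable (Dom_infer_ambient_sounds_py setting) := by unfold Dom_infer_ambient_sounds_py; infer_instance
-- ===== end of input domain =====

set_option maxRecDepth 10000


-- B replaces A's eleven per-keyword substring scans by a single sliding-window pass over
-- the text hashing candidate substrings into a keyword->group dict (objective: alternative).

-- ===== PORT A =====
-- Literal port of A: lowercase once, then eleven sequential if-branches extending/appending to `sounds`.
def infer_ambient_sounds_py (setting : String) : List String :=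
  let setting_lower := PySem.Str.lower setting
  let sounds : List String := []
  let sounds := if (["beach", "ocean", "sea", "coast", "shore"].any (fun w => PySem.Str.isIn w setting_lower)) then sounds ++ ["waves crashing", "seagulls"] else sounds
  let sounds := if (["forest", "woods", "jungle", "trees", "nature"].any (fun w => PySem.Str.isIn w setting_lower)) then sounds ++ ["birds chirping", "rustling leaves", "wind through trees"] else sounds
  let city_keywords := ["city", "street", "urban", "downtown", "sidewalk"]
  let sounds := if (city_keywords.any (fun w => PySem.Str.isIn w setting_lower)) then sounds ++ ["city traffic", "distant sirens", "urban ambience"] else sounds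
  let indoor_keywords := ["office", "room", "indoor", "building", "house", "home"]
  let sounds := if (indoor_keywords.any (fun w => PySem.Str.isIn w setting_lower)) then sounds ++ ["room tone"] else sounds
  let sports_keywords := ["gym", "basketball", "court", "field", "stadium", "arena"]
  let sounds := if (sports_keywords.any (fun w => PySem.Str.isIn w setting_lower)) then sounds ++ ["sneakers squeaking", "crowd noise"] else sounds
  let sounds := if (["restaurant", "cafe", "coffee", "diner", "bar"].any (fun w => PySem.Str.isIn w setting_lower)) then sounds ++ ["clinking dishes", "ambient chatter"] else sounds
  let sounds := if (["park", "garden", "lawn", "yard", "backyard"].any (fun w => PySem.Str.isIn w setting_lower)) then sounds ++ ["birds", "wind"] else sounds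
  let sounds := if (["mountain", "hill", "hike", "trail", "cliff"].any (fun w => PySem.Str.isIn w setting_lower)) then sounds ++ ["wind", "distant birds"] else sounds
  let sounds := if (["river", "stream", "waterfall", "lake", "pond"].any (fun w => PySem.Str.isIn w setting_lower)) then sounds ++ ["flowing water"] else sounds
  let sounds := if (["rain", "storm", "thunder"].any (fun w => PySem.Str.isIn w setting_lower)) then sounds ++ ["rain sounds"] else sounds
  let sounds := if (["night", "evening", "dark"].any (fun w => PySem.Str.isIn w setting_lower)) then sounds ++ ["crickets"] else sounds
  sounds

-- ===== PORT B =====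
-- B's module-level rule table RULES.
def pvRules : List (List String × List String) :=
  [ (["beach", "ocean", "sea", "coast", "shore"], ["waves crashing", "seagulls"]),
    (["forest", "woods", "jungle", "trees", "nature"], ["birds chirping", "rustling leaves", "wind through trees"]),
    (["city", "street", "urban", "downtown", "sidewalk"], ["city traffic", "distant sirens", "urban ambience"]),
    (["office", "room", "indoor", "building", "house", "home"], ["room tone"]),
    (["gym", "basketball", "court", "field", "stadium", "arena"], ["sneakers squeaking", "crowd noise"]),
    (["restaurant", "cafe", "coffee", "diner", "bar"], ["clinking dishes", "ambient chatter"]),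
    (["park", "garden", "lawn", "yard", "backyard"], ["birds", "wind"]),
    (["mountain", "hill", "hike", "trail", "cliff"], ["wind", "distant birds"]),
    (["river", "stream", "waterfall", "lake", "pond"], ["flowing water"]),
    (["rain", "storm", "thunder"], ["rain sounds"]),
    (["night", "evening", "dark"], ["crickets"]) ]

-- _KEYWORD_GROUP = {kw: g for g, (kws, _) in enumerate(RULES) for kw in kws}
def pvKeywordGroup : PySem.Dict String Int :=
  PySem.Dict.ofList ((PySem.List.enumerate pvRules).flatMap (fun p => p.2.1.map (fun kw => (kw, p.1))))

-- _LENGTHS = sorted({len(kw) for kw in _KEYWORD_GROUP})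
def pvLengths : List Int :=
  PySem.List.sorted (PySem.Set.ofList ((PySem.Dict.keys pvKeywordGroup).map (fun kw => PySem.Str.len kw))) (fun x => x)

-- the inner double loop of B: collect the set of matched group indices
def pvMatched (s : String) : PySem.Set Int :=
  (PySem.List.pyRange 0 (PySem.Str.len s)).foldl
    (fun m i => pvLengths.foldl
      (fun m length =>
        match PySem.Dict.get? pvKeywordGroup (PySem.Str.slice s (some i) (some (i + length))) with
        | some g => PySem.Set.add m g
        | none => m) m)
    PySem.Set.empty

-- Port of B: sliding-window dict matching, then tags emitted group-wise.
def infer_ambient_sounds_py_alt (setting : String) : List String :=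
  let s := PySem.Str.lower setting
  let matched := pvMatched s
  (PySem.List.enumerate pvRules).flatMap (fun p => if PySem.Set.contains matched p.1 then p.2.2 else [])

-- ===== PRECONDITION & SPEC =====
def Spec_infer_ambient_sounds_py (setting : String) (out : List String) : Prop := out = infer_ambient_sounds_py_alt setting
instance (setting : String) (out : List String) : Decidable (Spec_infer_ambient_sounds_py setting out) := by unfold Spec_infer_ambient_sounds_py; infer_instance

-- ===== CLAIM (what is proved, stated in full; the proofs are below) =====
def Claim_equal_infer_ambient_sounds_py : Prop := ∀ (setting : String), Dom_infer_ambient_sounds_py setting → Spec_infer_ambient_sounds_py setting (infer_ambient_sounds_py setting)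

-- ===== LEMMAS AND PROOFS =====

-- the flattened (keyword, group) pair list underlying pvKeywordGroup
def pvPairs : List (String × Int) :=
  (PySem.List.enumerate pvRules).flatMap (fun p => p.2.1.map (fun kw => (kw, p.1)))

theorem pvKeywordGroup_eq_mk : pvKeywordGroup = PySem.Dict.mk pvPairs := by decide

theorem pvLengths_eq : pvLengths = [3, 4, 5, 6, 7, 8, 9, 10] := by decide

-- get? of a literal dict hits only pairs of its list
theorem get?_mk_mem {k : String} {v : Int} :
    ∀ (ps : List (String × Int)), (PySem.Dict.mk ps).get? k = some v → (k, v) ∈ ps := by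
  intro ps
  induction ps with
  | nil => simp [PySem.Dict.get?]
  | cons p rest ih =>
    obtain ⟨k', v'⟩ := p
    intro h
    rw [PySem.Dict.get?_mk_cons] at h
    by_cases hk : (k' == k) = true
    · simp only [hk, if_true, Option.some_inj] at h
      have hk' : k' = k := by simpa using hk
      simp [hk', h]
    · simp only [hk] at h
      exact List.mem_cons_of_mem _ (ih h)

-- membership in a foldl that conditionally adds
theorem foldl_mem_or {α : Type} (P : α → Int → Prop) (F : PySem.Set Int → α → PySem.Set Int)
    (hF : ∀ m a x, x ∈ F m a ↔ x ∈ m ∨ P a x) :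
    ∀ (l : List α) (m0 : PySem.Set Int) (x : Int),
      x ∈ l.foldl F m0 ↔ x ∈ m0 ∨ ∃ a ∈ l, P a x := by
  intro l
  induction l with
  | nil => simp
  | cons a l ih =>
    intro m0 x
    simp only [List.foldl_cons, ih, hF]
    constructor
    · rintro ((h | h) | ⟨b, hb, hP⟩)
      · exact Or.inl h
      · exact Or.inr ⟨a, by simp, h⟩
      · exact Or.inr ⟨b, by simp [hb], hP⟩
    · rintro (h | ⟨b, hb, hP⟩)
      · exact Or.inl (Or.inl h)
      · rcases List.mem_cons.mp hb with hba | hbl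
        · exact Or.inl (Or.inr (hba ▸ hP))
        · exact Or.inr ⟨b, hbl, hP⟩

theorem mem_pvMatched (s : String) (x : Int) :
    x ∈ pvMatched s ↔ ∃ i, 0 ≤ i ∧ i < (s.toList.length : Int) ∧ ∃ L ∈ pvLengths,
      PySem.Dict.get? pvKeywordGroup (PySem.Str.slice s (some i) (some (i + L))) = some x := by
  unfold pvMatched
  rw [foldl_mem_or
      (fun i x => ∃ L ∈ pvLengths,
        PySem.Dict.get? pvKeywordGroup (PySem.Str.slice s (some i) (some (i + L))) = some x)
      _
      (by
        intro m i x
        rw [foldl_mem_or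
            (fun L x => PySem.Dict.get? pvKeywordGroup (PySem.Str.slice s (some i) (some (i + L))) = some x)
            _
            (by
              intro m L x
              cases hg : PySem.Dict.get? pvKeywordGroup (PySem.Str.slice s (some i) (some (i + L))) with
              | none => simp [hg]
              | some g => simp [hg, PySem.Set.mem_add, eq_comm])])]
  simp only [PySem.Set.empty]
  constructor
  · rintro (h | ⟨i, hi, hP⟩)
    · simp at h
    · exact ⟨i, (PySem.List.mem_pyRange_one.mp hi).1,
        by simpa [PySem.Str.len_eq] using (PySem.List.mem_pyRange_one.mp hi).2, hP⟩
  · rintro ⟨i, h0, hn, hP⟩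
    exact Or.inr ⟨i, PySem.List.mem_pyRange_one.mpr ⟨h0, by simpa [PySem.Str.len_eq] using hn⟩, hP⟩

-- per-group characterisation: the group index lands in `matched` iff one of its keywords occurs
theorem contains_pvMatched_eq (s : String) (g : Int) (kws : List String)
    (hfwd : ∀ p ∈ pvPairs, p.2 = g → p.1 ∈ kws)
    (hbwd : ∀ kw ∈ kws, PySem.Dict.get? pvKeywordGroup kw = some g ∧ kw.toList ≠ [] ∧
        ((kw.toList.length : Int) ∈ pvLengths)) :
    PySem.Set.contains (pvMatched s) g = kws.any (fun w => PySem.Str.isIn w s) := by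
  rcases hany : kws.any (fun w => PySem.Str.isIn w s) with _ | _
  · -- no keyword occurs: g not matched
    rw [← Bool.not_eq_true]
    intro hc
    have hg := (mem_pvMatched s g).mp ((PySem.Set.contains_iff _ _).mp hc)
    rcases hg with ⟨i, h0, hn, L, hL, hget⟩
    have hmem : (PySem.Str.slice s (some i) (some (i + L)), g) ∈ pvPairs :=
      get?_mk_mem pvPairs (pvKeywordGroup_eq_mk ▸ hget)
    have hkw : PySem.Str.slice s (some i) (some (i + L)) ∈ kws := hfwd _ hmem rfl
    -- the slice is an infix of s, so that keyword occurs: contradiction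
    have hLpos : (0:Int) ≤ L := by rw [pvLengths_eq] at hL; fin_cases hL <;> norm_num
    have hin : PySem.Str.isIn (PySem.Str.slice s (some i) (some (i + L))) s = true := by
      rw [PySem.Str.isIn_iff_infix, PySem.Str.toList_slice, PySem.Chars.slice_eq_listSlice,
        PySem.List.slice_toNat s.toList h0 (by omega)]
      have h1 : (s.toList.drop i.toNat).take ((i + L).toNat - i.toNat) <+: s.toList.drop i.toNat :=
        List.take_prefix _ _
      exact List.IsInfix.trans h1.isInfix (s.toList.drop_suffix i.toNat).isInfix
    have hall := List.any_eq_false.mp hany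
    exact absurd hin (by simpa using hall _ hkw)
  · -- some keyword occurs: g is matched
    rcases List.any_eq_true.mp hany with ⟨kw, hkwmem, hkwin⟩
    obtain ⟨hget, hne, hlen⟩ := hbwd kw hkwmem
    have hinf : ∃ j, kw.toList <+: s.toList.drop j :=
      (PySem.Chars.exists_prefix_drop_iff_isIn kw.toList s.toList).mpr
        (by simpa using hkwin)
    rcases hinf with ⟨j, hpre⟩
    have hjlt : j < s.toList.length := by
      by_contra hge
      rw [List.drop_eq_nil_of_le (Nat.le_of_not_lt hge)] at hpre
      exact hne (List.prefix_nil.mp hpre)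
    apply (PySem.Set.contains_iff _ _).mpr
    apply (mem_pvMatched s g).mpr
    refine ⟨(j : Int), by positivity, by exact_mod_cast hjlt, (kw.toList.length : Int), hlen, ?_⟩
    have hslice : PySem.Str.slice s (some (j:Int)) (some ((j:Int) + (kw.toList.length : Int))) = kw := by
      apply String.toList_inj.mp
      rw [PySem.Str.toList_slice, PySem.Chars.slice_eq_listSlice,
        PySem.List.slice_toNat s.toList (by positivity) (by positivity)]
      have : ((j:Int) + (kw.toList.length:Int)).toNat - (j:Int).toNat = kw.toList.length := by omega
      rw [this, Int.toNat_natCast]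
      exact (List.prefix_iff_eq_take.mp hpre).symm
    rw [hslice, hget]

-- turn B's enumerate/flatMap into A's filter/flatMap, given pointwise equal conditions
theorem flatMap_enumerate_eq (f : Int → Bool) (g : (List String × List String) → Bool) :
    ∀ (rules : List (List String × List String)) (s0 : Int),
      (∀ p ∈ PySem.List.enumerate rules s0, f p.1 = g p.2) →
      (PySem.List.enumerate rules s0).flatMap (fun p => if f p.1 then p.2.2 else [])
        = (rules.filter g).flatMap (fun r => r.2) := by
  intro rules
  induction rules with
  | nil => intro s0 _; simp [PySem.List.enumerate_nil]
  | cons r rs ih =>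
    intro s0 h
    rw [PySem.List.enumerate_cons, List.flatMap_cons]
    have hr := h (s0, r) (by rw [PySem.List.enumerate_cons]; exact List.mem_cons_self)
    have hrest := ih (s0 + 1) (fun p hp => h p (by rw [PySem.List.enumerate_cons]; exact List.mem_cons_of_mem _ hp))
    rcases hg : g r with _ | _ <;>
      simp only [List.filter_cons, hg, hrest] <;>
      simp [hr.trans hg]

-- A's eleven sequential if/extend branches ARE a fold of the extend step over the rule table.
theorem pv_A_eq_foldl (setting : String) :
    infer_ambient_sounds_py setting
      = pvRules.foldl
          (fun a r => if r.1.any (fun w => PySem.Str.isIn w (PySem.Str.lower setting)) then a ++ r.2 else a)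
          [] := rfl

-- A branch-by-branch extend starting from `acc` equals `acc ++` (tags of matching rules).
theorem pv_foldl_extend_eq (cond : List String × List String → Bool) :
    ∀ (rules : List (List String × List String)) (acc : List String),
      rules.foldl (fun a r => if cond r then a ++ r.2 else a) acc
        = acc ++ (rules.filter cond).flatMap (fun r => r.2) := by
  intro rules
  induction rules with
  | nil => intro acc; simp
  | cons r rs ih =>
    intro acc
    by_cases h : cond r = true <;>
      simp [List.foldl_cons, h, ih, List.append_assoc]

-- ===== VERDICT (by name: the statement is the Claim_ definition above) =====
theorem infer_ambient_sounds_py_spec : Claim_equal_infer_ambient_sounds_py := by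
  intro setting _
  unfold Spec_infer_ambient_sounds_py infer_ambient_sounds_py_alt
  rw [pv_A_eq_foldl,
    pv_foldl_extend_eq (fun r => r.1.any (fun w => PySem.Str.isIn w (PySem.Str.lower setting))),
    List.nil_append]
  refine (flatMap_enumerate_eq _ _ pvRules 0 ?_).symm
  intro p hp
  simp only [pvRules, PySem.List.enumerate_cons, PySem.List.enumerate_nil, List.mem_cons,
    List.not_mem_nil, or_false] at hp
  rcases hp with rfl|rfl|rfl|rfl|rfl|rfl|rfl|rfl|rfl|rfl|rfl <;>
    exact contains_pvMatched_eq _ _ _ (by decide) (by decide)
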